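-- pv_equiv track=rewrite | github.com/ezravergabera/Cocoon | shell.py | print_res
-- ===== SOURCE A (Python) =====
-- def print_res(fn, res):
--     text = ''
--     text += f'File name:    {fn}\n'
--     text += "Result:\n"
--     result = str(res).split(", ")
--     for resout in result:
--         text += f'{" ": >5}{resout}\n'
--
--     return text
-- ===== SOURCE B (Python) =====
-- def print_res(fn, res):
--     # One-shot formatting: each ", " separator becomes a newline plus 5-space indent.
--     return f'File name:    {fn}\nResult:\n     ' + str(res).replace(', ', '\n     ') + '\n'
-- ===== Notes on version B (the rewrite author's own statement) =====
-- stated objective: simpler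
-- what changed: Replaces the split-into-list-and-loop accumulation with a single str.replace that turns each ', ' separator into a newline plus 5-space indent, so no list is built and no per-element loop runs.
import Mathlib
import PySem

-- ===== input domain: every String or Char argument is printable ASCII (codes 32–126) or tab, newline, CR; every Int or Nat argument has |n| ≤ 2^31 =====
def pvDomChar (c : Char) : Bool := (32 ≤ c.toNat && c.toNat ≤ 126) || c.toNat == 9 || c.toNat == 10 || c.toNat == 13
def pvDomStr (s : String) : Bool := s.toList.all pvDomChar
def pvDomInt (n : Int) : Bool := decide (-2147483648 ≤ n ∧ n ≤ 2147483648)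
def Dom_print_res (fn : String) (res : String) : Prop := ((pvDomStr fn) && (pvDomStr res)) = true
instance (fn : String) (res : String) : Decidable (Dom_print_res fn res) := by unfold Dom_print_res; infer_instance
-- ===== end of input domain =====

-- B replaces A's split-into-list-and-loop with one str.replace turning each ", " into "\n" + 5-space indent (simpler; same output).

-- ===== PORT A =====
-- Strings are handled on the List Char side per the PySem convention; String.ofList wraps the result.
def print_res (fn : String) (res : String) : String :=
  let text : List Char := []
  let text := text ++ ("File name:    ".toList ++ fn.toList ++ ['\n'])
  let text := text ++ "Result:\n".toList
  let result := PySem.Chars.splitOn res.toList ", ".toList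
  let text := result.foldl (fun acc resout => acc ++ ("     ".toList ++ resout ++ ['\n'])) text
  String.ofList text

-- ===== PORT B =====
def print_res_alt (fn : String) (res : String) : String :=
  String.ofList ("File name:    ".toList ++ fn.toList ++ "\nResult:\n     ".toList
    ++ PySem.Chars.replace res.toList ", ".toList "\n     ".toList ++ ['\n'])

-- ===== PRECONDITION & SPEC =====
def Spec_print_res (fn : String) (res : String) (out : String) : Prop := out = print_res_alt fn res
instance (fn : String) (res : String) (out : String) : Decidable (Spec_print_res fn res out) := by unfold Spec_print_res; infer_instance

-- ===== CLAIM (what is proved, stated in full; the proofs are below) =====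
def Claim_equal_print_res : Prop := ∀ (fn : String) (res : String), Dom_print_res fn res → Spec_print_res fn res (print_res fn res)

-- ===== LEMMAS AND PROOFS =====

-- splitOn.go's trailing accumulator distributes out.
theorem pv_splitOn_go_acc (sep : List Char) : ∀ (fuel : Nat) (l cur : List Char) (acc : List (List Char)),
    PySem.Chars.splitOn.go sep fuel l cur acc = acc.reverse ++ PySem.Chars.splitOn.go sep fuel l cur [] := by
  intro fuel
  induction fuel with
  | zero => intro l cur acc; simp [PySem.Chars.splitOn.go]
  | succ f ih =>
    intro l cur acc
    cases l with
    | nil => simp [PySem.Chars.splitOn.go]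
    | cons c t =>
      simp only [PySem.Chars.splitOn.go]
      split
      · rw [ih _ _ [cur.reverse], ih _ _ (cur.reverse :: acc)]; simp
      · exact ih t (c :: cur) acc

-- replace.go's accumulator distributes out.
theorem pv_replace_go_acc (old new : List Char) : ∀ (fuel : Nat) (l acc : List Char),
    PySem.Chars.replace.go old new fuel l acc = acc.reverse ++ PySem.Chars.replace.go old new fuel l [] := by
  intro fuel
  induction fuel with
  | zero => intro l acc; simp [PySem.Chars.replace.go]
  | succ f ih =>
    intro l acc
    cases l with
    | nil => simp [PySem.Chars.replace.go]
    | cons c t =>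
      simp only [PySem.Chars.replace.go]
      split
      · rw [ih _ (new.reverse ++ acc), ih _ (new.reverse ++ [])]; simp
      · rw [ih _ (c :: acc), ih _ [c]]; simp
-- replace.go is fuel-insensitive once fuel covers the remaining input.
theorem pv_replace_go_fuel (old new : List Char) (hold : old ≠ []) :
    ∀ (fuel fuel' : Nat) (l acc : List Char), l.length ≤ fuel → l.length ≤ fuel' →
    PySem.Chars.replace.go old new fuel l acc = PySem.Chars.replace.go old new fuel' l acc := by
  intro fuel
  induction fuel with
  | zero =>
    intro fuel' l acc h h'
    have : l = [] := by cases l with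
      | nil => rfl
      | cons c t => simp at h
    subst this
    cases fuel' <;> simp [PySem.Chars.replace.go]
  | succ f ih =>
    intro fuel' l acc h h'
    cases l with
    | nil => cases fuel' <;> simp [PySem.Chars.replace.go]
    | cons c t =>
      cases fuel' with
      | zero => simp at h'
      | succ f' =>
        simp only [PySem.Chars.replace.go]
        have hone : 1 ≤ old.length := by
          cases old with
          | nil => exact absurd rfl hold
          | cons _ _ => simp
        split
        · have hdrop : (List.drop old.length (c :: t)).length ≤ t.length := by
            simp [List.length_drop]; omega
          exact ih f' _ _ (by simp at h; omega) (by simp at h'; omega)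
        · exact ih f' t _ (by simp at h; omega) (by simp at h'; omega)

-- splitOn.go never returns the empty list of pieces.
theorem pv_splitOn_go_ne_nil (sep : List Char) : ∀ (fuel : Nat) (l cur : List Char) (acc : List (List Char)),
    PySem.Chars.splitOn.go sep fuel l cur acc ≠ [] := by
  intro fuel
  induction fuel with
  | zero => intro l cur acc; simp [PySem.Chars.splitOn.go]
  | succ f ih =>
    intro l cur acc
    cases l with
    | nil => simp [PySem.Chars.splitOn.go]
    | cons c t =>
      simp only [PySem.Chars.splitOn.go]
      split
      · exact ih _ _ _
      · exact ih _ _ _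

-- Core: joining the split pieces with `new` is replace.go, with the pending piece `cur` in front.
theorem pv_join_splitOn_go (sep new : List Char) (hsep : sep ≠ []) :
    ∀ (fuel : Nat) (l cur : List Char), l.length < fuel →
    PySem.Chars.join new (PySem.Chars.splitOn.go sep fuel l cur []) =
      cur.reverse ++ PySem.Chars.replace.go sep new fuel l [] := by
  intro fuel
  induction fuel with
  | zero => intro l cur h; omega
  | succ f ih =>
    intro l cur h
    cases l with
    | nil => simp [PySem.Chars.splitOn.go, PySem.Chars.replace.go, PySem.Chars.join, List.intercalate]
    | cons c t =>
      simp only [PySem.Chars.splitOn.go, PySem.Chars.replace.go]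
      split
      · have hdrop : (List.drop sep.length (c :: t)).length < f := by
          have : 1 ≤ sep.length := by
            cases sep with
            | nil => exact absurd rfl hsep
            | cons _ _ => simp
          simp [List.length_drop]; simp at h; omega
        rw [pv_splitOn_go_acc sep f _ [] [cur.reverse]]
        have hne := pv_splitOn_go_ne_nil sep f (List.drop sep.length (c :: t)) [] []
        obtain ⟨p, ps, hps⟩ := List.exists_cons_of_ne_nil hne
        simp only [List.reverse_cons, List.reverse_nil, List.nil_append, List.singleton_append]
        rw [hps]
        have : PySem.Chars.join new (cur.reverse :: p :: ps) = cur.reverse ++ new ++ PySem.Chars.join new (p :: ps) := by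
          simp [PySem.Chars.join, List.intercalate, List.intersperse]
        rw [this, ← hps, ih _ [] hdrop]
        rw [pv_replace_go_acc sep new f _ (new.reverse ++ [])]
        simp
      · have ht : t.length < f := by simp at h; omega
        rw [ih t (c :: cur) ht]
        rw [pv_replace_go_acc sep new f t (c :: [])]
        simp
-- flatMap with a fixed prefix/suffix is prefix ++ join-by-(suffix++prefix) ++ suffix, for nonempty piece lists.
theorem pv_flatMap_join (ind nl : List Char) :
    ∀ (ps : List (List Char)), ps ≠ [] →
    List.flatMap (fun p => ind ++ p ++ nl) ps = ind ++ PySem.Chars.join (nl ++ ind) ps ++ nl := by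
  intro ps
  induction ps with
  | nil => intro h; exact absurd rfl h
  | cons p ps ih =>
    intro _
    cases ps with
    | nil => simp [PySem.Chars.join, List.intercalate]
    | cons q qs =>
      have := ih (by simp)
      simp only [List.flatMap_cons] at this ⊢
      rw [this]
      simp [PySem.Chars.join, List.intercalate, List.intersperse]

-- ===== VERDICT (by name: the statement is the Claim_ definition above) =====
theorem print_res_spec : Claim_equal_print_res := by
  intro fn res _
  unfold Spec_print_res print_res print_res_alt PySem.Chars.splitOn PySem.Chars.replace
  apply congrArg String.ofList
  rw [PySem.List.foldl_append_eq_flatMap]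
  rw [pv_flatMap_join "     ".toList ['\n'] _ (pv_splitOn_go_ne_nil _ _ _ _ _)]
  rw [pv_join_splitOn_go ", ".toList (['\n'] ++ "     ".toList) (by decide) _ _ [] (by omega)]
  rw [pv_replace_go_fuel ", ".toList (['\n'] ++ "     ".toList) (by decide) _ res.toList.length res.toList [] (by omega) (le_refl _)]
  simp [List.append_assoc]
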